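-- pv_equiv track=rewrite | github.com/FireRedNinja/advent-of-code | 2022/10/10.py | part1
-- ===== SOURCE A (Python) =====
-- def part1(data):
--     """Solve part 1"""
--     X = 1
--     cycle = 0
--     cycles = [20, 60, 100, 140, 180, 220]
--     signal_strength = 0
--
--
--     for op in data:
--         cycle += 1
--
--         if cycle in cycles:
--             signal_strength += X * cycle
--
--         if op[0] == "addx":
--             cycle += 1
--
--             if cycle in cycles:
--                 signal_strength += X * cycle
--
--             X += int(op[1])
--
--     return signal_strength
-- ===== SOURCE B (Python) =====
-- def part1(data):
--     """Solve part 1"""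
--     # Pass 1: build the X-register value for every cycle.
--     history = []
--     X = 1
--     for op in data:
--         history.append(X)
--         if op[0] == "addx":
--             history.append(X)
--             X += int(op[1])
--     # Pass 2: milestone summation by table lookup.
--     return sum(cycle * history[cycle - 1]
--                for cycle in [20, 60, 100, 140, 180, 220]
--                if cycle - 1 < len(history))
-- ===== Notes on version B (the rewrite author's own statement) =====
-- stated objective: alternative
-- what changed: A interleaves milestone checks inside the cycle simulation; B first builds a per-cycle history table of the X register in one pass, then computes the answer in a separate pass as a sum of indexed lookups at the six milestone cycles.
import Mathlib
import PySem

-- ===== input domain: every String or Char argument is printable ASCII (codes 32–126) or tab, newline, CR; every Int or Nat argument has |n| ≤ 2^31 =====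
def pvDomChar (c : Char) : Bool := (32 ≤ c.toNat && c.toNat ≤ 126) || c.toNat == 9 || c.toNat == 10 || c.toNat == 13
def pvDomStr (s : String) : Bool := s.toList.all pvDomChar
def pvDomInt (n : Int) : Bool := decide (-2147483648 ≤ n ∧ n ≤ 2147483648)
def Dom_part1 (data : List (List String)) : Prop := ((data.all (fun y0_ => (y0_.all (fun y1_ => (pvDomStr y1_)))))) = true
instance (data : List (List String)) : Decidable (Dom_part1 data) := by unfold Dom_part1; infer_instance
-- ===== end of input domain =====

-- B builds a per-cycle history table of X first, then sums the six milestones in a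
-- separate lookup pass; A interleaves milestone checks with the simulation (alternative decomposition).

-- ===== PORT A =====
def cyclesP : List Int := [20, 60, 100, 140, 180, 220]

-- A's for-loop over data with state (X, cycle, signal_strength)
def part1LoopA : List (List String) → Int → Int → Int → Int
  | [], _, _, ss => ss
  | op :: rest, X, cycle, ss =>
    let cycle1 := cycle + 1
    let ss1 := if cyclesP.contains cycle1 then ss + X * cycle1 else ss
    if PySem.List.pyGetD op 0 "" = "addx" then
      let cycle2 := cycle1 + 1
      let ss2 := if cyclesP.contains cycle2 then ss1 + X * cycle2 else ss1
      part1LoopA rest (X + (PySem.Int.ofStr? (PySem.List.pyGetD op 1 "")).getD 0) cycle2 ss2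
    else
      part1LoopA rest X cycle1 ss1

def part1 (data : List (List String)) : Int := part1LoopA data 1 0 0

-- ===== PORT B =====
-- pass 1: history-building loop, state (history, X), appending X once per cycle
def simStep (st : List Int × Int) (op : List String) : List Int × Int :=
  let h1 := st.1 ++ [st.2]
  if PySem.List.pyGetD op 0 "" = "addx" then
    (h1 ++ [st.2], st.2 + (PySem.Int.ofStr? (PySem.List.pyGetD op 1 "")).getD 0)
  else (h1, st.2)

def part1AltSim (data : List (List String)) : List Int × Int :=
  data.foldl simStep ([], 1)

def milestonesB : List Int := [20, 60, 100, 140, 180, 220]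

def part1_alt (data : List (List String)) : Int :=
  let history := (part1AltSim data).1
  milestonesB.foldl (fun acc c =>
    if c - 1 < (history.length : Int) then acc + c * PySem.List.pyGetD history (c - 1) 0 else acc) 0

-- ===== PRECONDITION & SPEC =====
-- Pre_ excludes exactly the inputs where Python A raises: an empty op (IndexError on op[0]),
-- and an "addx" op missing op[1] (IndexError) or whose op[1] is not int()-parsable (ValueError).
def Pre_part1 (data : List (List String)) : Prop :=
  ∀ op ∈ data, op ≠ [] ∧
    (PySem.List.pyGetD op 0 "" = "addx" →
      2 ≤ op.length ∧ (PySem.Int.ofStr? (PySem.List.pyGetD op 1 "")).isSome)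
instance (data : List (List String)) : Decidable (Pre_part1 data) := by unfold Pre_part1; infer_instance

def pvWitness_part1 : List (List String) := [["noop"], ["addx", "3"], ["addx", "-5"]]

def Spec_part1 (data : List (List String)) (out : Int) : Prop := out = part1_alt data
instance (data : List (List String)) (out : Int) : Decidable (Spec_part1 data out) := by unfold Spec_part1; infer_instance

-- ===== CLAIM (what is proved, stated in full; the proofs are below) =====
def Claim_equal_part1 : Prop := ∀ (data : List (List String)), Dom_part1 data → Pre_part1 data → Spec_part1 data (part1 data)

-- ===== LEMMAS AND PROOFS =====

-- per-cycle X values of the simulation, as a structural recursion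
def histRec : List (List String) → Int → List Int
  | [], _ => []
  | op :: rest, X =>
    if PySem.List.pyGetD op 0 "" = "addx" then
      X :: X :: histRec rest (X + (PySem.Int.ofStr? (PySem.List.pyGetD op 1 "")).getD 0)
    else X :: histRec rest X

-- A's loop, re-expressed at cycle granularity over the history list
def gLoop : List Int → Int → Int → Int
  | [], _, ss => ss
  | x :: t, n, ss => gLoop t (n + 1) (if cyclesP.contains (n + 1) then ss + x * (n + 1) else ss)

-- the milestone term, relative to a starting cycle n
def mTerm (c n : Int) (h : List Int) : Int :=
  if n < c ∧ c - n ≤ (h.length : Int) then c * h.getD (c - n - 1).toNat 0 else 0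

def mSum (n : Int) (h : List Int) : Int := (cyclesP.map (fun c => mTerm c n h)).sum

theorem loopA_eq_gLoop (data : List (List String)) :
    ∀ X n ss, part1LoopA data X n ss = gLoop (histRec data X) n ss := by
  induction data with
  | nil => intro X n ss; rfl
  | cons op rest ih =>
    intro X n ss
    by_cases h : PySem.List.pyGetD op 0 "" = "addx" <;>
      simp [part1LoopA, histRec, gLoop, h, ih]

theorem sim_fst_eq_histRec (data : List (List String)) :
    ∀ (acc : List Int) (X : Int),
      (data.foldl simStep (acc, X)).1 = acc ++ histRec data X := by
  induction data with
  | nil => intro acc X; simp [histRec]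
  | cons op rest ih =>
    intro acc X
    by_cases h : PySem.List.pyGetD op 0 "" = "addx" <;>
      simp [List.foldl_cons, simStep, histRec, h, ih]

theorem mTerm_step (c n x : Int) (t : List Int) :
    mTerm c n (x :: t) = (if c = n + 1 then c * x else 0) + mTerm c (n + 1) t := by
  unfold mTerm
  simp only [List.length_cons]
  push_cast
  rcases lt_trichotomy c (n + 1) with hlt | heq | hgt
  · rw [if_neg (by omega), if_neg (by omega), if_neg (by omega)]; simp
  · subst heq
    rw [if_pos ⟨by omega, by omega⟩, if_pos rfl, if_neg (by omega)]
    have h0 : (n + 1 - n - 1).toNat = 0 := by omega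
    simp
  · by_cases hle : c - (n + 1) ≤ (t.length : Int)
    · rw [if_pos ⟨by omega, by omega⟩, if_neg (by omega), if_pos ⟨by omega, hle⟩]
      have hnat : (c - n - 1).toNat = (c - (n + 1) - 1).toNat + 1 := by omega
      simp [hnat]
    · rw [if_neg (by omega), if_neg (by omega), if_neg (by omega)]; simp

theorem indicator6 (n x : Int) :
    (if (20:Int) = n + 1 then 20 * x else 0) + (if (60:Int) = n + 1 then 60 * x else 0)
    + (if (100:Int) = n + 1 then 100 * x else 0) + (if (140:Int) = n + 1 then 140 * x else 0)
    + (if (180:Int) = n + 1 then 180 * x else 0) + (if (220:Int) = n + 1 then 220 * x else 0)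
    = (if cyclesP.contains (n + 1) then x * (n + 1) else 0) := by
  simp only [cyclesP, List.contains_cons, List.contains_nil]
  split_ifs <;> simp_all <;> first | linarith [mul_comm x (n + 1)] | omega

theorem mSum_step (n x : Int) (t : List Int) :
    mSum n (x :: t) = (if cyclesP.contains (n + 1) then x * (n + 1) else 0) + mSum (n + 1) t := by
  simp only [mSum, cyclesP, List.map_cons, List.map_nil, List.sum_cons, List.sum_nil,
    mTerm_step]
  have ind := indicator6 n x
  simp only [cyclesP] at ind
  linarith [ind]

theorem gLoop_eq_mSum (h : List Int) : ∀ n ss, gLoop h n ss = ss + mSum n h := by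
  induction h with
  | nil => intro n ss; simp [gLoop, mSum, mTerm, cyclesP]
  | cons x t ih =>
    intro n ss
    simp only [gLoop, ih, mSum_step]
    split_ifs <;> ring

theorem bterm (c : Int) (hc : 0 < c) (h : List Int) (acc : Int) :
    (if c - 1 < (h.length : Int) then acc + c * PySem.List.pyGetD h (c - 1) 0 else acc)
      = acc + mTerm c 0 h := by
  unfold mTerm
  have e : c - 0 - 1 = c - 1 := by ring
  rw [e]
  by_cases hlt : c - 1 < (h.length : Int)
  · rw [if_pos hlt, if_pos ⟨hc, by omega⟩,
      PySem.List.pyGetD_eq_getElem h 0 (by omega) hlt,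
      List.getD_eq_getElem h 0 (by omega)]
  · rw [if_neg hlt, if_neg (by omega)]
    simp

theorem foldB (h : List Int) (cs : List Int) (hcs : ∀ c ∈ cs, 0 < c) :
    ∀ acc : Int,
      cs.foldl (fun acc c =>
        if c - 1 < (h.length : Int) then acc + c * PySem.List.pyGetD h (c - 1) 0 else acc) acc
      = acc + (cs.map (fun c => mTerm c 0 h)).sum := by
  induction cs with
  | nil => intro acc; simp
  | cons c cs ih =>
    intro acc
    simp only [List.foldl_cons, List.map_cons, List.sum_cons]
    rw [ih (fun d hd => hcs d (List.mem_cons_of_mem _ hd)),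
      bterm c (hcs c List.mem_cons_self) h acc]
    ring

theorem alt_eq_mSum (data : List (List String)) :
    part1_alt data = mSum 0 (part1AltSim data).1 := by
  simp only [part1_alt]
  rw [foldB (part1AltSim data).1 milestonesB (by decide) 0]
  simp [mSum, milestonesB, cyclesP]

-- ===== VERDICT (by name: the statement is the Claim_ definition above) =====
theorem part1_spec : Claim_equal_part1 := by
  intro data _ _
  unfold Spec_part1
  rw [alt_eq_mSum]
  have hsim : (part1AltSim data).1 = histRec data 1 := by
    simpa using sim_fst_eq_histRec data [] 1
  rw [hsim]
  rw [show part1 data = part1LoopA data 1 0 0 from rfl, loopA_eq_gLoop,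
    gLoop_eq_mSum]
  simp
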